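-- pv_equiv track=rewrite | github.com/DVampire/AgentWorld | src/agents/multi_agent_system.py | keyword_based_routing
-- ===== SOURCE A (Python) =====
-- from typing import Dict, List, Any, Optional, Callable
--
-- def keyword_based_routing(message: str, state: Dict[str, Any]) -> str:
--     """Keyword-based routing function."""
--     agents = state.get("agents", {})
--
--     # Define keywords for each agent
--     agent_keywords = {
--         "researcher": ["research", "study", "analysis", "investigate", "find"],
--         "writer": ["write", "compose", "draft", "create", "generate"],
--         "coder": ["code", "program", "develop", "implement", "debug"],
--         "planner": ["plan", "organize", "schedule", "coordinate", "manage"]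
--     }
--
--     message_lower = message.lower()
--
--     # Find the agent with the most matching keywords
--     best_agent = None
--     max_matches = 0
--
--     for agent_name, keywords in agent_keywords.items():
--         if agent_name in agents:
--             matches = sum(1 for keyword in keywords if keyword in message_lower)
--             if matches > max_matches:
--                 max_matches = matches
--                 best_agent = agent_name
--
--     return best_agent or list(agents.keys())[0] if agents else None
-- ===== SOURCE B (Python) =====
-- KEYWORD_OWNERS = [
--     ("research", "researcher"), ("study", "researcher"), ("analysis", "researcher"),
--     ("investigate", "researcher"), ("find", "researcher"),
--     ("write", "writer"), ("compose", "writer"), ("draft", "writer"),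
--     ("create", "writer"), ("generate", "writer"),
--     ("code", "coder"), ("program", "coder"), ("develop", "coder"),
--     ("implement", "coder"), ("debug", "coder"),
--     ("plan", "planner"), ("organize", "planner"), ("schedule", "planner"),
--     ("coordinate", "planner"), ("manage", "planner"),
-- ]
-- AGENT_ORDER = ["researcher", "writer", "coder", "planner"]
--
--
-- def _hits(ml, agents):
--     """Owners of the matched keywords, one flat pass over the inverted table."""
--     return [owner for kw, owner in KEYWORD_OWNERS if owner in agents and kw in ml]
--
--
-- def _tally(hits):
--     count = {}
--     for owner in hits:
--         count[owner] = count.get(owner, 0) + 1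
--     return count
--
--
-- def keyword_based_routing(message, state):
--     agents = state.get("agents", {})
--     if not agents:
--         return None
--     count = _tally(_hits(message.lower(), agents))
--     top = 0
--     for name in AGENT_ORDER:
--         top = max(top, count.get(name, 0))
--     if top == 0:
--         return next(iter(agents))
--     for name in AGENT_ORDER:
--         if count.get(name, 0) == top:
--             return name
-- ===== Notes on version B (the rewrite author's own statement) =====
-- stated objective: alternative
-- what changed: Replaces A's per-agent loop with an inline keyword count and a running strict argmax by a flat inverted (keyword -> owner) table tallied into a count dict in one pass, then a max-then-first-match selection over the fixed agent order; fallback behaviour (first agent key on zero matches, None on empty agents) is unchanged.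
import Mathlib
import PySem

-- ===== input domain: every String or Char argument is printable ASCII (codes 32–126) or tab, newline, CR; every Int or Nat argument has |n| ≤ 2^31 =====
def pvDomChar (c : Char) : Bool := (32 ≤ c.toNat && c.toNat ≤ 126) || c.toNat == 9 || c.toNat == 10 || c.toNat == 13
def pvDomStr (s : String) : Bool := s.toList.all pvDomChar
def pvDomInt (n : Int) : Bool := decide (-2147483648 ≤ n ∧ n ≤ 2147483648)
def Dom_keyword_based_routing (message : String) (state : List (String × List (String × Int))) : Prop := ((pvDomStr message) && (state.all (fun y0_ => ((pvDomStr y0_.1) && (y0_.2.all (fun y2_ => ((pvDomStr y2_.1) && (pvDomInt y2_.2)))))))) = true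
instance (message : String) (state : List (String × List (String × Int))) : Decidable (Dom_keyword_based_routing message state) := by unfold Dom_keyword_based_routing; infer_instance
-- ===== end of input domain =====

-- B replaces A's per-agent running strict argmax by a flat inverted (keyword -> owner) table
-- tallied into a count dict, then a max-then-first-match selection (objective: alternative; same cost).

-- ===== PORT A =====
def pvKwA : List (String × List String) :=
  [("researcher", ["research", "study", "analysis", "investigate", "find"]),
   ("writer", ["write", "compose", "draft", "create", "generate"]),
   ("coder", ["code", "program", "develop", "implement", "debug"]),
   ("planner", ["plan", "organize", "schedule", "coordinate", "manage"])]

-- sum(1 for keyword in keywords if keyword in message_lower)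
def pvMatches (ml : String) (ks : List String) : Int :=
  ks.foldl (fun s k => s + (if PySem.Str.isIn k ml then 1 else 0)) 0

def keyword_based_routing (message : String) (state : List (String × List (String × Int))) : Option String :=
  let agents : PySem.Dict String Int := PySem.Dict.mk ((PySem.Dict.mk state).getD "agents" [])
  let message_lower := PySem.Str.lower message
  let r := pvKwA.foldl (fun (acc : Option String × Int) p =>
      if agents.contains p.1 then
        let m := pvMatches message_lower p.2
        if acc.2 < m then (some p.1, m) else acc
      else acc) (none, 0)
  if agents.items = [] then none
  else match r.1 with
       | some b => some b
       | none => PySem.List.pyGet? agents.keys 0   -- list(agents.keys())[0]; agents nonempty here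

-- ===== PORT B =====
-- flat inverted table KEYWORD_OWNERS
def pvKwPairs : List (String × String) :=
  [("research", "researcher"), ("study", "researcher"), ("analysis", "researcher"),
   ("investigate", "researcher"), ("find", "researcher"),
   ("write", "writer"), ("compose", "writer"), ("draft", "writer"),
   ("create", "writer"), ("generate", "writer"),
   ("code", "coder"), ("program", "coder"), ("develop", "coder"),
   ("implement", "coder"), ("debug", "coder"),
   ("plan", "planner"), ("organize", "planner"), ("schedule", "planner"),
   ("coordinate", "planner"), ("manage", "planner")]

def pvOrder : List String := ["researcher", "writer", "coder", "planner"]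

-- owners of the matched keywords, one flat pass over the inverted table
def pvHits (ml : String) (agents : PySem.Dict String Int) : List String :=
  (pvKwPairs.filter (fun q => agents.contains q.2 && PySem.Str.isIn q.1 ml)).map Prod.snd

def pvTally (hits : List String) : PySem.Dict String Int :=
  hits.foldl (fun d o => d.insert o (d.getD o 0 + 1)) PySem.Dict.empty

def keyword_based_routing_alt (message : String) (state : List (String × List (String × Int))) : Option String :=
  let agents : PySem.Dict String Int := PySem.Dict.mk ((PySem.Dict.mk state).getD "agents" [])
  if agents.items = [] then none
  else
    let count := pvTally (pvHits (PySem.Str.lower message) agents)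
    let top := pvOrder.foldl (fun t n => max t (count.getD n 0)) 0
    if top = 0 then PySem.List.pyGet? agents.keys 0   -- next(iter(agents)); agents nonempty here
    else pvOrder.find? (fun n => count.getD n 0 == top)

-- ===== PRECONDITION & SPEC =====
def Spec_keyword_based_routing (message : String) (state : List (String × List (String × Int))) (out : Option String) : Prop := out = keyword_based_routing_alt message state
instance (message : String) (state : List (String × List (String × Int))) (out : Option String) : Decidable (Spec_keyword_based_routing message state out) := by unfold Spec_keyword_based_routing; infer_instance

-- ===== CLAIM (what is proved, stated in full; the proofs are below) =====
def Claim_equal_keyword_based_routing : Prop := ∀ (message : String) (state : List (String × List (String × Int))), Dom_keyword_based_routing message state → Spec_keyword_based_routing message state (keyword_based_routing message state)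

-- ===== LEMMAS AND PROOFS =====

theorem pvMatches_le (ml : String) (ks : List String) : ∀ s : Int,
    s ≤ ks.foldl (fun s k => s + (if PySem.Str.isIn k ml then 1 else 0)) s := by
  induction ks with
  | nil => intro s; simp
  | cons k ks ih =>
      intro s
      have h := ih (s + (if PySem.Str.isIn k ml then 1 else 0))
      simp only [List.foldl_cons]
      split_ifs at h ⊢ <;> omega

theorem pvMatches_nonneg (ml : String) (ks : List String) : 0 ≤ pvMatches ml ks := by
  unfold pvMatches
  exact pvMatches_le ml ks 0

theorem pv_count_filter_map (b : String) (p : String × String → Bool) (l : List (String × String)) :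
    ((l.filter p).map Prod.snd).count b = l.countP (fun q => p q && q.2 == b) := by
  induction l with
  | nil => rfl
  | cons x xs ih =>
      by_cases h : p x <;>
        simp [h, List.countP_cons, List.count_cons, ih]

theorem pvCount_r (ml : String) (ag : PySem.Dict String Int) :
    (pvTally (pvHits ml ag)).getD "researcher" 0 =
      if ag.contains "researcher" then pvMatches ml ["research", "study", "analysis", "investigate", "find"] else 0 := by
  unfold pvTally pvHits
  rw [PySem.Dict.getD_foldl_insert_add_one, pv_count_filter_map]
  simp only [pvKwPairs, List.countP_cons, List.countP_nil]
  simp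
  split_ifs <;> simp_all [pvMatches, List.foldl]

theorem pvCount_w (ml : String) (ag : PySem.Dict String Int) :
    (pvTally (pvHits ml ag)).getD "writer" 0 =
      if ag.contains "writer" then pvMatches ml ["write", "compose", "draft", "create", "generate"] else 0 := by
  unfold pvTally pvHits
  rw [PySem.Dict.getD_foldl_insert_add_one, pv_count_filter_map]
  simp only [pvKwPairs, List.countP_cons, List.countP_nil]
  simp
  split_ifs <;> simp_all [pvMatches, List.foldl]

theorem pvCount_c (ml : String) (ag : PySem.Dict String Int) :
    (pvTally (pvHits ml ag)).getD "coder" 0 =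
      if ag.contains "coder" then pvMatches ml ["code", "program", "develop", "implement", "debug"] else 0 := by
  unfold pvTally pvHits
  rw [PySem.Dict.getD_foldl_insert_add_one, pv_count_filter_map]
  simp only [pvKwPairs, List.countP_cons, List.countP_nil]
  simp
  split_ifs <;> simp_all [pvMatches, List.foldl]

theorem pvCount_p (ml : String) (ag : PySem.Dict String Int) :
    (pvTally (pvHits ml ag)).getD "planner" 0 =
      if ag.contains "planner" then pvMatches ml ["plan", "organize", "schedule", "coordinate", "manage"] else 0 := by
  unfold pvTally pvHits
  rw [PySem.Dict.getD_foldl_insert_add_one, pv_count_filter_map]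
  simp only [pvKwPairs, List.countP_cons, List.countP_nil]
  simp
  split_ifs <;> simp_all [pvMatches, List.foldl]

theorem pv_find?_order (p : String → Bool) :
    List.find? p ["researcher", "writer", "coder", "planner"] =
      (if p "researcher" then some "researcher" else if p "writer" then some "writer"
       else if p "coder" then some "coder" else if p "planner" then some "planner" else none) := by
  rcases h1 : p "researcher" <;> rcases h2 : p "writer" <;> rcases h3 : p "coder" <;> rcases h4 : p "planner" <;>
    simp [h1, h2, h3, h4]

-- ===== VERDICT (by name: the statement is the Claim_ definition above) =====
set_option maxHeartbeats 2000000 in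
theorem keyword_based_routing_spec : Claim_equal_keyword_based_routing := by
  intro message state _
  unfold Spec_keyword_based_routing keyword_based_routing keyword_based_routing_alt
  by_cases hemp : ((PySem.Dict.mk state).getD "agents" []) = []
  · simp [hemp]
  · simp only [if_neg hemp]
    simp only [pvKwA, pvOrder, List.foldl_cons, List.foldl_nil]
    rw [pv_find?_order]
    simp only [beq_iff_eq]
    simp only [pvCount_r, pvCount_w, pvCount_c, pvCount_p]
    have n1 := pvMatches_nonneg (PySem.Str.lower message) ["research", "study", "analysis", "investigate", "find"]
    have n2 := pvMatches_nonneg (PySem.Str.lower message) ["write", "compose", "draft", "create", "generate"]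
    have n3 := pvMatches_nonneg (PySem.Str.lower message) ["code", "program", "develop", "implement", "debug"]
    have n4 := pvMatches_nonneg (PySem.Str.lower message) ["plan", "organize", "schedule", "coordinate", "manage"]
    by_cases hr : (PySem.Dict.mk ((PySem.Dict.mk state).getD "agents" [])).contains "researcher" <;>
      by_cases hw : (PySem.Dict.mk ((PySem.Dict.mk state).getD "agents" [])).contains "writer" <;>
      by_cases hc : (PySem.Dict.mk ((PySem.Dict.mk state).getD "agents" [])).contains "coder" <;>
      by_cases hp : (PySem.Dict.mk ((PySem.Dict.mk state).getD "agents" [])).contains "planner" <;>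
      simp only [hr, hw, hc, hp, if_pos, if_neg, Bool.false_eq_true, not_false_eq_true] <;>
      generalize pvMatches (PySem.Str.lower message) ["research", "study", "analysis", "investigate", "find"] = c1 at * <;>
      generalize pvMatches (PySem.Str.lower message) ["write", "compose", "draft", "create", "generate"] = c2 at * <;>
      generalize pvMatches (PySem.Str.lower message) ["code", "program", "develop", "implement", "debug"] = c3 at * <;>
      generalize pvMatches (PySem.Str.lower message) ["plan", "organize", "schedule", "coordinate", "manage"] = c4 at * <;>
      split_ifs <;> first | rfl | omega
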